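-- pv_equiv track=rewrite | github.com/mosquito1115/mmwave | generate_sigs.py | generate_sigs
-- ===== SOURCE A (Python) =====
-- def generate_sigs(start_sample, n_sample_vib, n_sample_still, pattern_str):
--     """
--     根据给定参数生成信号段信息列表。
--
--     参数：
--         start_sample: int，起始采样点
--         n_sample_vib: int，振动段长度
--         n_sample_still: int，静止段长度
--         pattern_str: str，由'0'和'1'组成，长度为3的倍数
--
--     返回：
--         sigs: list[(vib_pattern, bit_value, seg_start, seg_end)]
--     """
--     if len(pattern_str) % 3 != 0:
--         raise ValueError("pattern_str 的长度必须是 3 的倍数")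
--
--     n = len(pattern_str)
--     one_third = n // 3
--     sigs = []
--
--     cur_start = start_sample
--
--     for idx, bit in enumerate(pattern_str):
--         # bit_value 为 0 或 1
--         bit_value = int(bit)
--
--         # 根据bit_value和所在区域确定vib_pattern
--         if bit_value == 0:
--             vib_pattern = 0
--             seg_len = n_sample_still
--         else:
--             if idx < one_third:
--                 vib_pattern = 1
--             elif idx < 2 * one_third:
--                 vib_pattern = 2
--             else:
--                 vib_pattern = 3
--             seg_len = n_sample_vib
--
--         seg_start = cur_start
--         seg_end = cur_start + n_sample_vib
--         cur_start = cur_start + seg_len  # 更新下一个段的起点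
--
--         sigs.append((vib_pattern, bit_value, seg_start, seg_end))
--
--     return sigs
-- ===== SOURCE B (Python) =====
-- def generate_sigs(start_sample, n_sample_vib, n_sample_still, pattern_str):
--     if len(pattern_str) % 3 != 0:
--         raise ValueError("pattern_str 的长度必须是 3 的倍数")
--     n = len(pattern_str)
--     one_third = n // 3
--     # table-based decomposition: per-index value tables, then a prefix-sum table of starts
--     bit_values = [int(b) for b in pattern_str]
--     seg_lens = [n_sample_still if v == 0 else n_sample_vib for v in bit_values]
--     vib_patterns = [0 if int(b) == 0 else (1 if i < one_third else 2 if i < 2 * one_third else 3)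
--                     for i, b in enumerate(pattern_str)]
--     starts = [start_sample]
--     for L in seg_lens[:-1]:
--         starts.append(starts[-1] + L)
--     return [(p, v, s, s + n_sample_vib)
--             for p, v, s in zip(vib_patterns, bit_values, starts)]
-- ===== Notes on version B (the rewrite author's own statement) =====
-- stated objective: alternative
-- what changed: Replaces the single interleaved loop with a running accumulator by separate per-index tables (bit values, segment lengths, vibration patterns), an explicit prefix-sum table of segment starts, and a final zip that assembles the tuples.
import Mathlib
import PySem

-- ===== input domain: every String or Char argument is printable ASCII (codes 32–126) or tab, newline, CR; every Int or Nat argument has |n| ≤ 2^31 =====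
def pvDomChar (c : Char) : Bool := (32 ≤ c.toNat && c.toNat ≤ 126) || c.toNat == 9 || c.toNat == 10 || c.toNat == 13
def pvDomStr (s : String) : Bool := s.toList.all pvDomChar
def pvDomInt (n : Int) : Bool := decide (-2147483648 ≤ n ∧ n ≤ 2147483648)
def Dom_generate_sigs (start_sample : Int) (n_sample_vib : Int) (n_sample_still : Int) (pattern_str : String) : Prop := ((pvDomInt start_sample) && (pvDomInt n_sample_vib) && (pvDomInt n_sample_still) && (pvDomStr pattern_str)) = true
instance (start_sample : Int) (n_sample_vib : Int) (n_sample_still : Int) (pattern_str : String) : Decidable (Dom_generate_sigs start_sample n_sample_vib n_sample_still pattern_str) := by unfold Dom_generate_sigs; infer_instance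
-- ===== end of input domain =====

-- B builds per-index tables and a prefix-sum table of starts, then zips; A interleaves one loop with a running accumulator. Objective: alternative decomposition.


-- int(bit) for one character: exact when bit is an ASCII digit (Pre_ guarantees all characters are digits)
def pyDigit (c : Char) : Int := (c.toNat : Int) - 48

-- ===== PORT A =====
def generate_sigs (start_sample : Int) (n_sample_vib : Int) (n_sample_still : Int) (pattern_str : String) : List (Int × Int × Int × Int) :=
  let n : Int := PySem.Str.len pattern_str
  let one_third := PySem.Int.floordiv n 3
  ((PySem.List.enumerate pattern_str.toList 0).foldl
    (fun (st : Int × List (Int × Int × Int × Int)) (p : Int × Char) =>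
      let bit_value := pyDigit p.2
      let vib_pattern : Int :=
        if bit_value = 0 then 0
        else if p.1 < one_third then 1
        else if p.1 < 2 * one_third then 2
        else 3
      let seg_len := if bit_value = 0 then n_sample_still else n_sample_vib
      (st.1 + seg_len, st.2 ++ [(vib_pattern, bit_value, st.1, st.1 + n_sample_vib)]))
    (start_sample, [])).2

-- ===== PORT B =====
def generate_sigs_alt (start_sample : Int) (n_sample_vib : Int) (n_sample_still : Int) (pattern_str : String) : List (Int × Int × Int × Int) :=
  let n : Int := PySem.Str.len pattern_str
  let one_third := PySem.Int.floordiv n 3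
  let bit_values := pattern_str.toList.map pyDigit
  let seg_lens := bit_values.map (fun v => if v = 0 then n_sample_still else n_sample_vib)
  let vib_patterns := (PySem.List.enumerate pattern_str.toList 0).map
    (fun p => if pyDigit p.2 = 0 then (0 : Int)
              else if p.1 < one_third then 1
              else if p.1 < 2 * one_third then 2
              else 3)
  let starts := seg_lens.dropLast.foldl
    (fun (acc : List Int) L => acc ++ [PySem.List.pyGetD acc (-1) 0 + L]) [start_sample]
  (vib_patterns.zip (bit_values.zip starts)).map
    (fun t => (t.1, t.2.1, t.2.2, t.2.2 + n_sample_vib))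

-- ===== PRECONDITION & SPEC =====
-- Pre_ excludes exactly the inputs where A raises ValueError: length not a multiple of 3, or a non-digit character (int(bit) fails).
def Pre_generate_sigs (start_sample : Int) (n_sample_vib : Int) (n_sample_still : Int) (pattern_str : String) : Prop :=
  PySem.Int.mod (PySem.Str.len pattern_str) 3 = 0 ∧ pattern_str.toList.all PySem.Str.isdigit = true
instance (start_sample : Int) (n_sample_vib : Int) (n_sample_still : Int) (pattern_str : String) : Decidable (Pre_generate_sigs start_sample n_sample_vib n_sample_still pattern_str) := by unfold Pre_generate_sigs; infer_instance

def pvWitness_generate_sigs : Int × Int × Int × String := (0, 5, 3, "101")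

def Spec_generate_sigs (start_sample : Int) (n_sample_vib : Int) (n_sample_still : Int) (pattern_str : String) (out : List (Int × Int × Int × Int)) : Prop := out = generate_sigs_alt start_sample n_sample_vib n_sample_still pattern_str
instance (start_sample : Int) (n_sample_vib : Int) (n_sample_still : Int) (pattern_str : String) (out : List (Int × Int × Int × Int)) : Decidable (Spec_generate_sigs start_sample n_sample_vib n_sample_still pattern_str out) := by unfold Spec_generate_sigs; infer_instance

-- ===== CLAIM (what is proved, stated in full; the proofs are below) =====
def Claim_equal_generate_sigs : Prop := ∀ (start_sample : Int) (n_sample_vib : Int) (n_sample_still : Int) (pattern_str : String), Dom_generate_sigs start_sample n_sample_vib n_sample_still pattern_str → Pre_generate_sigs start_sample n_sample_vib n_sample_still pattern_str → Spec_generate_sigs start_sample n_sample_vib n_sample_still pattern_str (generate_sigs start_sample n_sample_vib n_sample_still pattern_str)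

-- ===== LEMMAS AND PROOFS =====

-- common recursive characterisation of the segment list
def gRec (ot nvib nstill : Int) : List Char → Int → Int → List (Int × Int × Int × Int)
  | [], _, _ => []
  | c :: rest, i, cur =>
      ((if pyDigit c = 0 then 0 else if i < ot then 1 else if i < 2 * ot then 2 else 3),
       pyDigit c, cur, cur + nvib)
      :: gRec ot nvib nstill rest (i + 1) (cur + (if pyDigit c = 0 then nstill else nvib))

-- prefix sums
def pScan (s : Int) : List Int → List Int
  | [] => [s]
  | L :: rest => s :: pScan (s + L) rest

lemma foldA (ot nvib nstill : Int) :
    ∀ (cs : List Char) (s cur : Int) (acc : List (Int × Int × Int × Int)),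
    ((PySem.List.enumerate cs s).foldl
      (fun (st : Int × List (Int × Int × Int × Int)) (p : Int × Char) =>
        let bit_value := pyDigit p.2
        let vib_pattern : Int :=
          if bit_value = 0 then 0
          else if p.1 < ot then 1
          else if p.1 < 2 * ot then 2
          else 3
        let seg_len := if bit_value = 0 then nstill else nvib
        (st.1 + seg_len, st.2 ++ [(vib_pattern, bit_value, st.1, st.1 + nvib)]))
      (cur, acc)).2 = acc ++ gRec ot nvib nstill cs s cur := by
  intro cs
  induction cs with
  | nil => intro s cur acc; simp [PySem.List.enumerate_nil, gRec]
  | cons c rest ih =>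
      intro s cur acc
      rw [PySem.List.enumerate_cons]
      simp only [List.foldl_cons, gRec]
      rw [ih (s + 1)]
      simp

lemma scan_fold :
    ∀ (ls : List Int) (pre : List Int) (s : Int),
    (ls.foldl (fun (acc : List Int) L => acc ++ [PySem.List.pyGetD acc (-1) 0 + L]) (pre ++ [s]))
      = pre ++ pScan s ls := by
  intro ls
  induction ls with
  | nil => intro pre s; simp [pScan]
  | cons L rest ih =>
      intro pre s
      simp only [List.foldl_cons, PySem.List.pyGetD_neg_one_append_singleton]
      have : (pre ++ [s]) ++ [s + L] = (pre ++ [s]) ++ [s + L] := rfl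
      rw [show pre ++ [s] ++ [s + L] = (pre ++ [s]) ++ [s + L] from rfl, ih (pre ++ [s]) (s + L)]
      simp [pScan]

lemma zipB (ot nvib nstill : Int) :
    ∀ (cs : List Char) (s cur : Int),
    (((PySem.List.enumerate cs s).map
        (fun p => if pyDigit p.2 = 0 then (0 : Int)
                  else if p.1 < ot then 1
                  else if p.1 < 2 * ot then 2
                  else 3)).zip
      ((cs.map pyDigit).zip
        (pScan cur (((cs.map pyDigit).map (fun v => if v = 0 then nstill else nvib)).dropLast)))).map
      (fun t => (t.1, t.2.1, t.2.2, t.2.2 + nvib))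
    = gRec ot nvib nstill cs s cur := by
  intro cs
  induction cs with
  | nil => intro s cur; simp [PySem.List.enumerate_nil, gRec]
  | cons c rest ih =>
      intro s cur
      cases rest with
      | nil => simp [PySem.List.enumerate_cons, PySem.List.enumerate_nil, pScan, gRec]
      | cons d ds =>
          rw [PySem.List.enumerate_cons]
          simp only [List.map_cons, List.dropLast_cons₂, pScan, List.zip_cons_cons]
          have h := ih (s + 1) (cur + (if pyDigit c = 0 then nstill else nvib))
          simp only [List.map_cons] at h
          rw [h]
          simp [gRec]

-- ===== VERDICT (by name: the statement is the Claim_ definition above) =====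
theorem generate_sigs_spec : Claim_equal_generate_sigs := by
  intro start_sample n_sample_vib n_sample_still pattern_str _ _
  unfold Spec_generate_sigs generate_sigs generate_sigs_alt
  simp only []
  rw [foldA]
  rw [show [start_sample] = ([] : List Int) ++ [start_sample] from rfl, scan_fold]
  simp only [List.nil_append]
  rw [zipB]
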